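-- pv_equiv track=rewrite | github.com/tonis2/BakeTurbo | trimsheet/unwrap.py | graphOfFaces
-- ===== SOURCE A (Python) =====
-- def sharedEdges(f1, f2):
--     result = []
--     for i in range(len(f1)):
--         for j in range(len(f2)):
--             if f1[i] == f2[j]:
--                 prevI = (i - 1) % len(f1)
--                 nextI = (i + 1) % len(f1)
--                 prevJ = (j - 1) % len(f2)
--                 nextJ = (j + 1) % len(f2)
--                 if f1[prevI] == f2[prevJ] or f1[prevI] == f2[nextJ]:
--                     result.append((prevI, i))
--     return result
--
-- def emptyMatrix(n, m):
--     return [[[] for _ in range(m)] for _ in range(n)]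
--
-- def graphOfFaces(mesh, seams=None):
--     if seams is None:
--         seams = []
--     graph = emptyMatrix(len(mesh), len(mesh))
--     for i in range(len(mesh) - 1):
--         for j in range(i + 1, len(mesh)):
--             if (i, j) in seams:
--                 continue
--             graph[i][j] = sharedEdges(mesh[i], mesh[j])
--             graph[j][i] = sharedEdges(mesh[j], mesh[i])
--     return graph
-- ===== SOURCE B (Python) =====
-- def _positions(face):
--     pos = {}
--     for j, v in enumerate(face):
--         pos.setdefault(v, []).append(j)
--     return pos
--
-- def _shared(f1, f2, pos2):
--     n, m = len(f1), len(f2)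
--     out = []
--     for i, v in enumerate(f1):
--         for j in pos2.get(v, ()):
--             p = f1[(i - 1) % n]
--             if p == f2[(j - 1) % m] or p == f2[(j + 1) % m]:
--                 out.append(((i - 1) % n, i))
--     return out
--
-- def graphOfFaces(mesh, seams=None):
--     seam_set = set(seams or ())
--     n = len(mesh)
--     pos = [_positions(f) for f in mesh]
--     def cell(r, c):
--         if r == c or (min(r, c), max(r, c)) in seam_set:
--             return []
--         f1 = mesh[r]
--         if not any(v in pos[c] for v in f1):
--             return []
--         return _shared(f1, mesh[c], pos[c])
--     return [[cell(r, c) for c in range(n)] for r in range(n)]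
-- ===== Notes on version B (the rewrite author's own statement) =====
-- stated objective: alternative
-- what changed: B replaces A's mutate-in-place all-pairs scan with nested vertex scans by precomputed per-face vertex->positions dictionaries (the inner scan over the second face disappears), a seam set, a shared-vertex test that skips face pairs with no common vertex, and a functional row-by-row matrix build instead of in-place assignment.
import Mathlib
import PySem

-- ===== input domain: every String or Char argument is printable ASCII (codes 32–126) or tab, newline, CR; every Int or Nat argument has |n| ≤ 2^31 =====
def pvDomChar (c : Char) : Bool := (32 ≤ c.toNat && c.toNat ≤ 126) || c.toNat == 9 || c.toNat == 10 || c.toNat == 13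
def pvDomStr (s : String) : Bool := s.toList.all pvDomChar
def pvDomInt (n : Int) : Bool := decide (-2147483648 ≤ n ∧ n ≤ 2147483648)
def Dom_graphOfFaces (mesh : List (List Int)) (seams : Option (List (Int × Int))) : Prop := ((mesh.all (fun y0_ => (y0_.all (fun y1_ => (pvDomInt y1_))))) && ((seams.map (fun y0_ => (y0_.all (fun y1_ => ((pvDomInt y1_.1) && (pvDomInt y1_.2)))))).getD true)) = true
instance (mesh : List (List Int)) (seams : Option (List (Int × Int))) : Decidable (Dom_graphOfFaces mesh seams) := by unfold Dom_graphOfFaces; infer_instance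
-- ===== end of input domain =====

-- B replaces A's all-pairs × all-vertex-pairs scan by per-face vertex→positions dictionaries and a
-- functional matrix build that skips pairs sharing no vertex (objective: alternative; A mutates only
-- its own fresh matrix, so only the return value is at stake).

-- ===== PORT A =====
def sharedEdges (f1 f2 : List Int) : List (Int × Int) :=
  (PySem.List.pyRange 0 (f1.length : Int) 1).foldl (fun result i =>
    (PySem.List.pyRange 0 (f2.length : Int) 1).foldl (fun result j =>
      if PySem.List.pyGetD f1 i 0 = PySem.List.pyGetD f2 j 0 then
        let prevI := PySem.Int.mod (i - 1) (f1.length : Int)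
        let prevJ := PySem.Int.mod (j - 1) (f2.length : Int)
        let nextJ := PySem.Int.mod (j + 1) (f2.length : Int)
        if PySem.List.pyGetD f1 prevI 0 = PySem.List.pyGetD f2 prevJ 0 ∨
           PySem.List.pyGetD f1 prevI 0 = PySem.List.pyGetD f2 nextJ 0 then
          result ++ [(prevI, i)]
        else result
      else result) result) []

def emptyMatrix (n m : Int) : List (List (List (Int × Int))) :=
  (PySem.List.pyRange 0 n 1).map (fun _ => (PySem.List.pyRange 0 m 1).map (fun _ => ([] : List (Int × Int))))

-- graph[i][j] = v  (indices are in range wherever A executes this)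
def setCell (g : List (List (List (Int × Int)))) (i j : Int) (v : List (Int × Int)) :
    List (List (List (Int × Int))) :=
  PySem.List.pySetD g i (PySem.List.pySetD (PySem.List.pyGetD g i []) j v)

def graphOfFaces (mesh : List (List Int)) (seams : Option (List (Int × Int))) : List (List (List (Int × Int))) :=
  let seams := seams.getD []
  let graph := emptyMatrix (mesh.length : Int) (mesh.length : Int)
  (PySem.List.pyRange 0 ((mesh.length : Int) - 1) 1).foldl (fun g i =>
    (PySem.List.pyRange (i + 1) (mesh.length : Int) 1).foldl (fun g j =>
      if (i, j) ∈ seams then g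
      else
        let g := setCell g i j (sharedEdges (PySem.List.pyGetD mesh i []) (PySem.List.pyGetD mesh j []))
        setCell g j i (sharedEdges (PySem.List.pyGetD mesh j []) (PySem.List.pyGetD mesh i []))) g) graph

-- ===== PORT B =====
-- vertex value → list of its positions in the face (Python: setdefault/append)
def positionsB (face : List Int) : PySem.Dict Int (List Int) :=
  (PySem.List.enumerate face).foldl
    (fun pos jv => pos.modify jv.2 [] (fun l => l ++ [jv.1])) PySem.Dict.empty

def sharedB (f1 f2 : List Int) (pos2 : PySem.Dict Int (List Int)) : List (Int × Int) :=
  let n : Int := f1.length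
  let m : Int := f2.length
  (PySem.List.enumerate f1).foldl (fun out iv =>
    (pos2.getD iv.2 []).foldl (fun out j =>
      let p := PySem.List.pyGetD f1 (PySem.Int.mod (iv.1 - 1) n) 0
      if p = PySem.List.pyGetD f2 (PySem.Int.mod (j - 1) m) 0 ∨
         p = PySem.List.pyGetD f2 (PySem.Int.mod (j + 1) m) 0 then
        out ++ [(PySem.Int.mod (iv.1 - 1) n, iv.1)]
      else out) out) []

def cellB (mesh : List (List Int)) (seamSet : PySem.Set (Int × Int))
    (pos : List (PySem.Dict Int (List Int))) (r c : Int) : List (Int × Int) :=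
  if r = c ∨ PySem.Set.contains seamSet (min r c, max r c) then []
  else
    let f1 := PySem.List.pyGetD mesh r []
    let posc := PySem.List.pyGetD pos c PySem.Dict.empty
    if !(f1.any (fun v => posc.contains v)) then []
    else sharedB f1 (PySem.List.pyGetD mesh c []) posc

def graphOfFaces_alt (mesh : List (List Int)) (seams : Option (List (Int × Int))) : List (List (List (Int × Int))) :=
  let seamSet := PySem.Set.ofList (seams.getD [])
  let pos := mesh.map positionsB
  (PySem.List.pyRange 0 (mesh.length : Int) 1).map (fun r =>
    (PySem.List.pyRange 0 (mesh.length : Int) 1).map (fun c => cellB mesh seamSet pos r c))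

-- ===== PRECONDITION & SPEC =====
def Spec_graphOfFaces (mesh : List (List Int)) (seams : Option (List (Int × Int))) (out : List (List (List (Int × Int)))) : Prop := out = graphOfFaces_alt mesh seams
instance (mesh : List (List Int)) (seams : Option (List (Int × Int))) (out : List (List (List (Int × Int)))) : Decidable (Spec_graphOfFaces mesh seams out) := by unfold Spec_graphOfFaces; infer_instance

-- ===== CLAIM (what is proved, stated in full; the proofs are below) =====
def Claim_equal_graphOfFaces : Prop := ∀ (mesh : List (List Int)) (seams : Option (List (Int × Int))), Dom_graphOfFaces mesh seams → Spec_graphOfFaces mesh seams (graphOfFaces mesh seams)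

-- ===== LEMMAS AND PROOFS =====

-- building the positions dictionary face-suffix by face-suffix
lemma positionsB_append (xs : List Int) (x : Int) :
    positionsB (xs ++ [x]) = (positionsB xs).modify x [] (fun l => l ++ [(xs.length : Int)]) := by
  unfold positionsB
  rw [PySem.List.enumerate_append, List.foldl_append]
  simp [PySem.List.enumerate]

-- the positions dictionary returns exactly the (increasing) list of indices holding v
lemma positionsB_getD (f : List Int) (v : Int) :
    (positionsB f).getD v [] =
      (PySem.List.pyRange 0 (f.length : Int) 1).filter
        (fun j => decide (v = PySem.List.pyGetD f j 0)) := by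
  induction f using List.reverseRecOn with
  | nil => simp [positionsB, PySem.List.enumerate]
  | append_singleton xs x ih =>
    rw [positionsB_append]
    have hlen : ((xs ++ [x]).length : Int) = (xs.length : Int) + 1 := by simp
    rw [hlen, PySem.List.pyRange_one_succ_right (by positivity), List.filter_append]
    have hfilter : (PySem.List.pyRange 0 (xs.length : Int) 1).filter
          (fun j => decide (v = PySem.List.pyGetD (xs ++ [x]) j 0))
        = (PySem.List.pyRange 0 (xs.length : Int) 1).filter
          (fun j => decide (v = PySem.List.pyGetD xs j 0)) := by
      apply List.filter_congr
      intro j hj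
      rw [PySem.List.mem_pyRange_one] at hj
      congr 1
      rw [PySem.List.pyGetD_eq_getElem _ _ hj.1 (by simp; omega),
          PySem.List.pyGetD_eq_getElem _ _ hj.1 (by exact_mod_cast hj.2)]
      congr 1
      exact List.getElem_append_left (by omega)
    rw [hfilter]
    have hlast : PySem.List.pyGetD (xs ++ [x]) (xs.length : Int) 0 = x := by
      rw [PySem.List.pyGetD_natCast]
      simp
    by_cases hvx : v = x
    · subst hvx
      rw [PySem.Dict.getD_modify_self, ih]
      simp [hlast]
    · rw [PySem.Dict.getD_modify_of_ne _ _ _ hvx, ih]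
      simp [hlast, hvx]

lemma positionsB_contains (f : List Int) (v : Int) :
    (positionsB f).contains v = decide (v ∈ f) := by
  induction f using List.reverseRecOn with
  | nil => simp [positionsB, PySem.List.enumerate]
  | append_singleton xs x ih =>
    rw [positionsB_append, PySem.Dict.contains_modify, ih]
    by_cases hvx : v = x <;> simp [hvx]

lemma positionsB_getD_of_not_mem (f : List Int) (v : Int) (h : v ∉ f) :
    (positionsB f).getD v [] = [] := by
  rw [positionsB_getD]
  apply List.filter_eq_nil_iff.mpr
  intro j hj
  rw [PySem.List.mem_pyRange_one] at hj
  simp only [decide_eq_true_eq]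
  intro he
  apply h
  rw [he, PySem.List.pyGetD_eq_getElem _ _ hj.1 (by exact_mod_cast hj.2)]
  exact List.getElem_mem _

-- L1: B's dictionary-driven loops compute exactly A's nested scan
lemma sharedEdges_eq_sharedB (f1 f2 : List Int) :
    sharedEdges f1 f2 = sharedB f1 f2 (positionsB f2) := by
  unfold sharedEdges sharedB
  rw [PySem.List.enumerate_eq_map_pyRange f1 0, List.foldl_map]
  simp only [PySem.List.len_eq]
  apply PySem.List.foldl_congr_mem
  intro acc i _
  rw [PySem.List.foldl_ite_eq_foldl_filter
        (p := fun j => PySem.List.pyGetD f1 i 0 = PySem.List.pyGetD f2 j 0)]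
  rw [positionsB_getD f2 (PySem.List.pyGetD f1 i 0)]

-- L2: faces sharing no vertex have no shared edges
lemma sharedEdges_nil_of_no_share (f1 f2 : List Int)
    (h : f1.any (fun v => (positionsB f2).contains v) = false) :
    sharedEdges f1 f2 = [] := by
  rw [sharedEdges_eq_sharedB]
  unfold sharedB
  simp only [List.any_eq_false] at h
  have hmem : ∀ iv ∈ PySem.List.enumerate f1, (positionsB f2).getD iv.2 [] = [] := by
    intro iv hiv
    rw [PySem.List.mem_enumerate_iff] at hiv
    obtain ⟨k, hk, rfl⟩ := hiv
    apply positionsB_getD_of_not_mem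
    have := h _ (List.getElem_mem hk)
    rw [positionsB_contains] at this
    simpa using this
  revert hmem
  generalize PySem.List.enumerate f1 = l
  intro hmem
  induction l with
  | nil => rfl
  | cons iv l ih =>
    rw [List.foldl_cons, hmem iv List.mem_cons_self]
    exact ih (fun jv hjv => hmem jv (List.mem_cons_of_mem _ hjv))

-- full n×n matrix given by an entry function
def MatF (n : Int) (f : Int → Int → List (Int × Int)) : List (List (List (Int × Int))) :=
  (PySem.List.pyRange 0 n 1).map (fun r => (PySem.List.pyRange 0 n 1).map (f r))

lemma MatF_congr (n : Int) (f g : Int → Int → List (Int × Int))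
    (h : ∀ r c, 0 ≤ r → r < n → 0 ≤ c → c < n → f r c = g r c) : MatF n f = MatF n g := by
  apply List.map_congr_left
  intro r hr
  rw [PySem.List.mem_pyRange_one] at hr
  apply List.map_congr_left
  intro c hc
  rw [PySem.List.mem_pyRange_one] at hc
  exact h r c hr.1 hr.2 hc.1 hc.2

lemma set_map_pyRange {α : Type} (g : Int → α) (n b : Int) (v : α) (hb0 : 0 ≤ b) :
    ((PySem.List.pyRange 0 n 1).map g).set b.toNat v
      = (PySem.List.pyRange 0 n 1).map (fun c => if c = b then v else g c) := by
  apply List.ext_getElem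
  · simp
  · intro k h1 h2
    simp only [List.getElem_set, List.getElem_map, PySem.List.getElem_pyRange_one]
    have heq : (b.toNat = k) ↔ ((0 : Int) + k = b) := by omega
    by_cases hk : b.toNat = k
    · simp [hk, heq.mp hk]
    · rw [if_neg hk, if_neg (fun he => hk (heq.mpr he))]

lemma setCell_MatF (n : Int) (f : Int → Int → List (Int × Int)) (a b : Int) (v : List (Int × Int))
    (ha0 : 0 ≤ a) (han : a < n) (hb0 : 0 ≤ b) :
    setCell (MatF n f) a b v = MatF n (fun r c => if r = a ∧ c = b then v else f r c) := by
  unfold setCell MatF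
  rw [PySem.List.pyGetD_map_pyRange_of_nonneg _ _ _ _ ha0 han]
  rw [PySem.List.pySetD_of_nonneg _ _ hb0, set_map_pyRange _ _ _ _ hb0]
  rw [PySem.List.pySetD_of_nonneg _ _ ha0, set_map_pyRange _ _ _ _ ha0]
  apply List.map_congr_left
  intro r hr
  by_cases hra : r = a
  · subst hra
    simp
  · simp [hra]

-- A's per-pair body, as a function of the pair
def stepA (mesh : List (List Int)) (s : List (Int × Int))
    (g : List (List (List (Int × Int)))) (p : Int × Int) : List (List (List (Int × Int))) :=
  if (p.1, p.2) ∈ s then g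
  else setCell (setCell g p.1 p.2
         (sharedEdges (PySem.List.pyGetD mesh p.1 []) (PySem.List.pyGetD mesh p.2 [])))
       p.2 p.1 (sharedEdges (PySem.List.pyGetD mesh p.2 []) (PySem.List.pyGetD mesh p.1 []))

-- which entries the pair list Q has already written
def hitB (s : List (Int × Int)) (Q : List (Int × Int)) (r c : Int) : Bool :=
  Q.any (fun p => !decide (p ∈ s) && (decide (p.1 = r ∧ p.2 = c) || decide (p.1 = c ∧ p.2 = r)))

lemma foldl_stepA (mesh : List (List Int)) (s : List (Int × Int)) (n : Int)
    (Q : List (Int × Int)) (hQ : ∀ p ∈ Q, 0 ≤ p.1 ∧ p.1 < p.2 ∧ p.2 < n)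
    (f : Int → Int → List (Int × Int)) :
    Q.foldl (stepA mesh s) (MatF n f)
      = MatF n (fun r c => if hitB s Q r c then
          sharedEdges (PySem.List.pyGetD mesh r []) (PySem.List.pyGetD mesh c []) else f r c) := by
  induction Q generalizing f with
  | nil => simp [hitB]
  | cons p Q ih =>
    obtain ⟨a, b⟩ := p
    obtain ⟨hp0, hp1, hp2⟩ := hQ (a, b) List.mem_cons_self
    simp only at hp0 hp1 hp2
    rw [List.foldl_cons]
    by_cases hs : (a, b) ∈ s
    · rw [show stepA mesh s (MatF n f) (a, b) = MatF n f from by simp [stepA, hs]]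
      rw [ih (fun q hq => hQ q (List.mem_cons_of_mem _ hq)) f]
      apply MatF_congr
      intro r c _ _ _ _
      have : hitB s ((a, b) :: Q) r c = hitB s Q r c := by
        simp [hitB, hs]
      rw [this]
    · have hstep : stepA mesh s (MatF n f) (a, b)
          = MatF n (fun r c =>
              if r = b ∧ c = a then sharedEdges (PySem.List.pyGetD mesh b []) (PySem.List.pyGetD mesh a [])
              else if r = a ∧ c = b then sharedEdges (PySem.List.pyGetD mesh a []) (PySem.List.pyGetD mesh b [])
              else f r c) := by
        unfold stepA
        rw [if_neg (by simpa using hs)]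
        rw [setCell_MatF n f a b _ hp0 (by omega) (by omega)]
        rw [setCell_MatF n _ b a _ (by omega) hp2 hp0]
      rw [hstep, ih (fun q hq => hQ q (List.mem_cons_of_mem _ hq))]
      apply MatF_congr
      intro r c _ _ _ _
      cases hq : hitB s Q r c with
      | true =>
        rw [if_pos rfl]
        have : hitB s ((a, b) :: Q) r c = true := by
          simp only [hitB, List.any_cons] at hq ⊢
          rw [hq, Bool.or_true]
        rw [if_pos this]
      | false =>
        rw [if_neg (by simp)]
        have hcons : hitB s ((a, b) :: Q) r c
            = (!decide ((a, b) ∈ s) && (decide (a = r ∧ b = c) || decide (a = c ∧ b = r))) := by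
          simp only [hitB, List.any_cons] at hq ⊢
          rw [hq, Bool.or_false]
        rw [hcons]
        by_cases h1 : a = r ∧ b = c
        · obtain ⟨e1, e2⟩ := h1
          subst e1; subst e2
          rw [if_neg (by omega), if_pos ⟨rfl, rfl⟩]
          simp [hs]
        · by_cases h2 : a = c ∧ b = r
          · obtain ⟨e1, e2⟩ := h2
            subst e1; subst e2
            rw [if_pos ⟨rfl, rfl⟩]
            simp [hs]
          · rw [if_neg (by tauto), if_neg (by tauto)]
            simp [h1, h2]

-- the list of pairs (i, j), 0 ≤ i < j < n, that A's two loops enumerate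
def pairsP (n : Int) : List (Int × Int) :=
  (PySem.List.pyRange 0 (n - 1) 1).flatMap (fun i => (PySem.List.pyRange (i + 1) n 1).map (fun j => (i, j)))

lemma mem_pairsP (n : Int) (p : Int × Int) : p ∈ pairsP n ↔ 0 ≤ p.1 ∧ p.1 < p.2 ∧ p.2 < n := by
  unfold pairsP
  simp only [List.mem_flatMap, List.mem_map, PySem.List.mem_pyRange_one]
  constructor
  · rintro ⟨i, ⟨hi0, hi1⟩, j, ⟨hj0, hj1⟩, rfl⟩
    exact ⟨hi0, by omega, hj1⟩
  · rintro ⟨h0, h1, h2⟩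
    exact ⟨p.1, ⟨h0, by omega⟩, p.2, ⟨by omega, h2⟩, rfl⟩

lemma graphOfFaces_eq_foldl (mesh : List (List Int)) (seams : Option (List (Int × Int))) :
    graphOfFaces mesh seams
      = (pairsP (mesh.length : Int)).foldl (stepA mesh (seams.getD []))
          (MatF (mesh.length : Int) (fun _ _ => [])) := by
  unfold graphOfFaces pairsP
  rw [List.foldl_flatMap]
  have hinit : emptyMatrix (mesh.length : Int) (mesh.length : Int)
      = MatF (mesh.length : Int) (fun _ _ => []) := rfl
  rw [hinit]
  have hfun : ∀ (acc : List (List (List (Int × Int)))) (i : Int),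
      (PySem.List.pyRange (i + 1) (mesh.length : Int) 1).foldl
        (fun g j => if (i, j) ∈ seams.getD [] then g
          else setCell (setCell g i j (sharedEdges (PySem.List.pyGetD mesh i []) (PySem.List.pyGetD mesh j [])))
            j i (sharedEdges (PySem.List.pyGetD mesh j []) (PySem.List.pyGetD mesh i []))) acc
      = ((PySem.List.pyRange (i + 1) (mesh.length : Int) 1).map (fun j => (i, j))).foldl
          (stepA mesh (seams.getD [])) acc := by
    intro acc i
    rw [List.foldl_map]
    rfl
  simp only [hfun]

-- ===== VERDICT (by name: the statement is the Claim_ definition above) =====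
theorem graphOfFaces_spec : Claim_equal_graphOfFaces := by
  unfold Claim_equal_graphOfFaces
  intro mesh seams _dom
  unfold Spec_graphOfFaces
  rw [graphOfFaces_eq_foldl]
  rw [foldl_stepA mesh (seams.getD []) (mesh.length : Int) (pairsP (mesh.length : Int))
        (fun p hp => (mem_pairsP _ p).mp hp) (fun _ _ => [])]
  show MatF (mesh.length : Int) _ = graphOfFaces_alt mesh seams
  have halt : graphOfFaces_alt mesh seams
      = MatF (mesh.length : Int)
          (fun r c => cellB mesh (PySem.Set.ofList (seams.getD [])) (mesh.map positionsB) r c) := rfl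
  rw [halt]
  apply MatF_congr
  intro r c hr0 hrn hc0 hcn
  have hposc : PySem.List.pyGetD (mesh.map positionsB) c PySem.Dict.empty
      = positionsB (PySem.List.pyGetD mesh c []) := by
    rw [PySem.List.pyGetD_eq_getElem _ _ hc0 (by simpa using hcn),
        PySem.List.pyGetD_eq_getElem _ _ hc0 (by exact_mod_cast hcn), List.getElem_map]
  have hcont : (PySem.Set.contains (PySem.Set.ofList (seams.getD [])) (min r c, max r c) = true)
      ↔ (min r c, max r c) ∈ seams.getD [] := by
    simp [pysem]
  by_cases hrc : r = c
  · subst hrc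
    have hhit : hitB (seams.getD []) (pairsP (mesh.length : Int)) r r = false := by
      apply List.any_eq_false.mpr
      intro p hp
      rw [mem_pairsP] at hp
      simp only [Bool.and_eq_true, Bool.or_eq_true, decide_eq_true_eq, Bool.not_eq_true']
      rintro ⟨-, (⟨h1, h2⟩ | ⟨h1, h2⟩)⟩ <;> omega
    rw [hhit, if_neg (by simp), cellB, if_pos (Or.inl rfl)]
  · have hminmax : 0 ≤ min r c ∧ min r c < max r c ∧ max r c < (mesh.length : Int) := by
      constructor
      · exact le_min hr0 hc0
      constructor
      · rcases lt_or_gt_of_ne hrc with h | h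
        · rw [min_eq_left h.le, max_eq_right h.le]; exact h
        · rw [min_eq_right h.le, max_eq_left h.le]; exact h
      · exact max_lt hrn hcn
    by_cases hseam : (min r c, max r c) ∈ seams.getD []
    · have hhit : hitB (seams.getD []) (pairsP (mesh.length : Int)) r c = false := by
        apply List.any_eq_false.mpr
        intro p hp
        rw [mem_pairsP] at hp
        simp only [Bool.and_eq_true, Bool.or_eq_true, decide_eq_true_eq, Bool.not_eq_true']
        rintro ⟨hns, (⟨h1, h2⟩ | ⟨h1, h2⟩)⟩
        · subst h1; subst h2
          rw [min_eq_left (by omega), max_eq_right (by omega)] at hseam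
          exact absurd hseam (by simpa using hns)
        · subst h1; subst h2
          rw [min_eq_right (by omega), max_eq_left (by omega)] at hseam
          exact absurd hseam (by simpa using hns)
      rw [hhit, if_neg (by simp), cellB, if_pos (Or.inr (hcont.mpr hseam))]
    · have hhit : hitB (seams.getD []) (pairsP (mesh.length : Int)) r c = true := by
        apply List.any_eq_true.mpr
        refine ⟨(min r c, max r c), (mem_pairsP _ _).mpr (by exact hminmax), ?_⟩
        simp only [Bool.and_eq_true, Bool.or_eq_true, decide_eq_true_eq, Bool.not_eq_true']
        refine ⟨by simpa using hseam, ?_⟩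
        rcases lt_or_gt_of_ne hrc with h | h
        · left; rw [min_eq_left h.le, max_eq_right h.le]; exact ⟨rfl, rfl⟩
        · right; rw [min_eq_right h.le, max_eq_left h.le]; exact ⟨rfl, rfl⟩
      rw [hhit, if_pos rfl, cellB,
          if_neg (by rw [not_or]; exact ⟨hrc, by simpa using (fun h => hseam (hcont.mp h))⟩)]
      simp only [hposc]
      cases hany : (PySem.List.pyGetD mesh r []).any
          (fun v => (positionsB (PySem.List.pyGetD mesh c [])).contains v) with
      | false =>
        rw [if_pos (by simp)]
        exact sharedEdges_nil_of_no_share _ _ hany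
      | true =>
        simp only [Bool.not_true]
        rw [if_neg (by simp)]
        exact sharedEdges_eq_sharedB _ _
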